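-- pv_equiv track=rewrite | github.com/sbft-cps-tool-competition/cps-tool-competition | ambiegenvae/common/road_validity_check.py | is_inside_map
-- ===== SOURCE A (Python) =====
-- def is_inside_map(points, map_size, margin):
--     """
--     Take the extreme points and ensure that their distance is smaller than the map side
--     """
--     '''
--     xs = [t[0] for t in interpolated_points]
--     ys = [t[1] for t in interpolated_points]
--
--     min_x, max_x = min(xs), max(xs)
--     min_y, max_y = min(ys), max(ys)
--
--     return (
--         0 < min_x
--         or min_x > map_size
--         and 0 < max_x
--         or max_x > map_size
--         and 0 < min_y
--         or min_y > map_size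
--         and 0 < max_y
--         or max_y > map_size
--     )
--     '''
--     min_size = 0 + margin
--     max_size = map_size - margin
--     for x, y in points:
--         if not (min_size <= x <= max_size and min_size <= y <= max_size):
--             return False
--     return True
-- ===== SOURCE B (Python) =====
-- def is_inside_map(points, map_size, margin):
--     if not points:
--         return True
--     xs = [p[0] for p in points]
--     ys = [p[1] for p in points]
--     lo = margin
--     hi = map_size - margin
--     return lo <= min(xs) and max(xs) <= hi and lo <= min(ys) and max(ys) <= hi
-- ===== Notes on version B (the rewrite author's own statement) =====
-- stated objective: alternative
-- what changed: Replaced the per-point early-exit scan with a bounding-box decomposition: extract xs/ys, take min/max of each, and check the four extreme bounds in one boolean (with an explicit empty-list guard).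
import Mathlib
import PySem

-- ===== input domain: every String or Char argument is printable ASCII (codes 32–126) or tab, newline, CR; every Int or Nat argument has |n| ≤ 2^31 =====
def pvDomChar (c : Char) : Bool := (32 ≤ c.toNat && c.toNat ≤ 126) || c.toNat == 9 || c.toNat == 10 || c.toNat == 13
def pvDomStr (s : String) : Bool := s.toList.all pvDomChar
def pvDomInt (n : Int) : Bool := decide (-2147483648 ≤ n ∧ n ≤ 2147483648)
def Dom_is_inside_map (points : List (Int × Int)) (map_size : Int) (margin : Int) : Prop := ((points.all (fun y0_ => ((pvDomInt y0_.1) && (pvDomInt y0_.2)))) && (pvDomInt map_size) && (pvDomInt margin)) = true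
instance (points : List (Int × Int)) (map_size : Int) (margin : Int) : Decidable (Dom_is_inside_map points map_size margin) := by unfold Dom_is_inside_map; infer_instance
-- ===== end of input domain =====

-- B replaces A's per-point early-exit scan by a bounding-box decomposition (min/max of xs and ys, then four bound checks); alternative structure, same cost.


-- ===== PORT A =====
-- A's loop: return False on the first point outside the margins, True if none is.
def isInsideLoop (min_size max_size : Int) : List (Int × Int) → Bool
  | [] => true
  | (x, y) :: rest =>
    if ¬(min_size ≤ x ∧ x ≤ max_size ∧ min_size ≤ y ∧ y ≤ max_size) then false
    else isInsideLoop min_size max_size rest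

def is_inside_map (points : List (Int × Int)) (map_size : Int) (margin : Int) : Bool :=
  let min_size := 0 + margin
  let max_size := map_size - margin
  isInsideLoop min_size max_size points

-- ===== PORT B =====
-- Python's min/max over a nonempty list = fold over the tail starting from the head.
def pyMinList (x : Int) (r : List Int) : Int := r.foldl min x
def pyMaxList (x : Int) (r : List Int) : Int := r.foldl max x

def is_inside_map_alt (points : List (Int × Int)) (map_size : Int) (margin : Int) : Bool :=
  match points with
  | [] => true
  | p :: rest =>
    let xs := rest.map Prod.fst
    let ys := rest.map Prod.snd
    let lo := margin
    let hi := map_size - margin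
    decide (lo ≤ pyMinList p.1 xs ∧ pyMaxList p.1 xs ≤ hi ∧
            lo ≤ pyMinList p.2 ys ∧ pyMaxList p.2 ys ≤ hi)

-- ===== PRECONDITION & SPEC =====
def Spec_is_inside_map (points : List (Int × Int)) (map_size : Int) (margin : Int) (out : Bool) : Prop := out = is_inside_map_alt points map_size margin
instance (points : List (Int × Int)) (map_size : Int) (margin : Int) (out : Bool) : Decidable (Spec_is_inside_map points map_size margin out) := by unfold Spec_is_inside_map; infer_instance

-- ===== CLAIM (what is proved, stated in full; the proofs are below) =====
def Claim_equal_is_inside_map : Prop := ∀ (points : List (Int × Int)) (map_size : Int) (margin : Int), Dom_is_inside_map points map_size margin → Spec_is_inside_map points map_size margin (is_inside_map points map_size margin)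

-- ===== LEMMAS AND PROOFS =====
theorem loop_eq_all (lo hi : Int) (l : List (Int × Int)) :
    isInsideLoop lo hi l = l.all (fun p => decide (lo ≤ p.1 ∧ p.1 ≤ hi ∧ lo ≤ p.2 ∧ p.2 ≤ hi)) := by
  induction l with
  | nil => rfl
  | cons p r ih =>
    obtain ⟨x, y⟩ := p
    simp only [isInsideLoop, List.all_cons, ih]
    split_ifs with h
    · simp [h]
    · simp [h]

theorem le_foldl_min (lo x : Int) (r : List Int) :
    lo ≤ r.foldl min x ↔ lo ≤ x ∧ ∀ a ∈ r, lo ≤ a := by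
  induction r generalizing x with
  | nil => simp
  | cons b t ih =>
    simp only [List.foldl_cons, ih, le_min_iff, List.mem_cons]
    constructor
    · rintro ⟨⟨h1, h2⟩, h3⟩
      exact ⟨h1, fun a ha => ha.elim (fun e => e ▸ h2) (h3 a)⟩
    · rintro ⟨h1, h2⟩
      exact ⟨⟨h1, h2 b (Or.inl rfl)⟩, fun a ha => h2 a (Or.inr ha)⟩

theorem foldl_max_le (hi x : Int) (r : List Int) :
    r.foldl max x ≤ hi ↔ x ≤ hi ∧ ∀ a ∈ r, a ≤ hi := by
  induction r generalizing x with
  | nil => simp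
  | cons b t ih =>
    simp only [List.foldl_cons, ih, max_le_iff, List.mem_cons]
    constructor
    · rintro ⟨⟨h1, h2⟩, h3⟩
      exact ⟨h1, fun a ha => ha.elim (fun e => e ▸ h2) (h3 a)⟩
    · rintro ⟨h1, h2⟩
      exact ⟨⟨h1, h2 b (Or.inl rfl)⟩, fun a ha => h2 a (Or.inr ha)⟩

-- ===== VERDICT (by name: the statement is the Claim_ definition above) =====
theorem is_inside_map_spec : Claim_equal_is_inside_map := by
  intro points map_size margin _
  unfold Spec_is_inside_map is_inside_map is_inside_map_alt
  rw [loop_eq_all]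
  cases points with
  | nil => rfl
  | cons p rest =>
    rw [Bool.eq_iff_iff]
    simp only [pyMinList, pyMaxList, List.all_cons, Bool.and_eq_true, List.all_eq_true,
      decide_eq_true_eq, le_foldl_min, foldl_max_le, List.mem_map, zero_add,
      forall_exists_index, and_imp, forall_apply_eq_imp_iff₂]
    constructor
    · rintro ⟨⟨h1, h2, h3, h4⟩, hrest⟩
      exact ⟨⟨h1, fun q hq => (hrest q hq).1⟩, ⟨h2, fun q hq => (hrest q hq).2.1⟩,
             ⟨h3, fun q hq => (hrest q hq).2.2.1⟩, ⟨h4, fun q hq => (hrest q hq).2.2.2⟩⟩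
    · rintro ⟨⟨h1, hx1⟩, ⟨h2, hx2⟩, ⟨h3, hy1⟩, ⟨h4, hy2⟩⟩
      exact ⟨⟨h1, h2, h3, h4⟩, fun q hq => ⟨hx1 q hq, hx2 q hq, hy1 q hq, hy2 q hq⟩⟩
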